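-- pv_equiv track=rewrite | github.com/CodeElementalist/Text-based_Adventure_Game | adventure_game.py | skill1
-- ===== SOURCE A (Python) =====
-- def skill1(items):
--     skill_list = []
--     for item in range(len(items)):
--         if item != 0 and items[item][0:6] == "weapon":
--             skill_list.append("Sword Slash")
--             skill_list.append("Counter Slash")
--             break
--     for item in range(len(items)):
--         if item != 0 and items[item][0:6] == "shield":
--             skill_list.append("Shield Deflection")
--             skill_list.append("Shield Block")
--             break
--     return skill_list
-- ===== SOURCE B (Python) =====
-- def skill1(items):
--     has_weapon = False
--     has_shield = False
--     for it in items[1:]: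
--         if it[0:6] == "weapon":
--             has_weapon = True
--         if it[0:6] == "shield":
--             has_shield = True
--     result = []
--     if has_weapon:
--         result += ["Sword Slash", "Counter Slash"]
--     if has_shield:
--         result += ["Shield Deflection", "Shield Block"]
--     return result
-- ===== Notes on version B (the rewrite author's own statement) =====
-- stated objective: simpler
-- what changed: Replaced A's two index-based early-break scans over range(len(items)) by a single pass over items[1:] maintaining two booleans, with the skill lists emitted after the loop in the fixed weapon-before-shield order.
import Mathlib
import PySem

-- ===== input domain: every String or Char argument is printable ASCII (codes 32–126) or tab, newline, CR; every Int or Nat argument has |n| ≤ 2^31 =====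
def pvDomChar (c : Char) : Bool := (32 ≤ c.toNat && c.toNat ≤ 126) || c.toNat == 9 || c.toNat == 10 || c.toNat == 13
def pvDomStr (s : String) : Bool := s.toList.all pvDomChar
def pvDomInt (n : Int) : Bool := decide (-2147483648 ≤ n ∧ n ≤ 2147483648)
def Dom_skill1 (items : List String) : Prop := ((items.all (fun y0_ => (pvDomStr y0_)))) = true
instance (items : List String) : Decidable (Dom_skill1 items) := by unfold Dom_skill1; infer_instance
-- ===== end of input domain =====

-- B replaces A's two early-break index scans by one boolean-accumulating pass over items[1:] (objective: simpler).

-- ===== PORT A =====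
-- one 'for item in range(len(items)): if item != 0 and items[item][0:6] == pref: append s1; append s2; break'
def skill1Loop (items : List String) (pref : List Char) (s1 s2 : String)
    (skills : List String) : List Int → List String
  | [] => skills
  | i :: rest =>
    if i ≠ 0 ∧ PySem.List.slice (PySem.List.pyGetD items i "").toList (some 0) (some 6) = pref then
      skills ++ [s1, s2]
    else
      skill1Loop items pref s1 s2 skills rest

def skill1 (items : List String) : List String :=
  let skills := skill1Loop items "weapon".toList "Sword Slash" "Counter Slash" []
      (PySem.List.pyRange 0 (items.length : Int) 1)
  skill1Loop items "shield".toList "Shield Deflection" "Shield Block" skills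
      (PySem.List.pyRange 0 (items.length : Int) 1)

-- ===== PORT B =====
def skill1_alt (items : List String) : List String :=
  let st := (PySem.List.slice items (some 1) none).foldl
    (fun (ws : Bool × Bool) it =>
      let p := PySem.List.slice it.toList (some 0) (some 6)
      (ws.1 || decide (p = "weapon".toList), ws.2 || decide (p = "shield".toList)))
    (false, false)
  (if st.1 then ["Sword Slash", "Counter Slash"] else []) ++
    (if st.2 then ["Shield Deflection", "Shield Block"] else [])

-- ===== PRECONDITION & SPEC =====
def Spec_skill1 (items : List String) (out : List String) : Prop := out = skill1_alt items
instance (items : List String) (out : List String) : Decidable (Spec_skill1 items out) := by unfold Spec_skill1; infer_instance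

-- ===== CLAIM (what is proved, stated in full; the proofs are below) =====
def Claim_equal_skill1 : Prop := ∀ (items : List String), Dom_skill1 items → Spec_skill1 items (skill1 items)

-- ===== LEMMAS AND PROOFS =====

def pvHasPref (pref : List Char) (it : String) : Bool :=
  decide (PySem.List.slice it.toList (some 0) (some 6) = pref)

theorem skill1Loop_drop (items : List String) (pref : List Char) (s1 s2 : String)
    (skills : List String) :
    ∀ (l : List String) (k : Int), 1 ≤ k → items.drop k.toNat = l →
    skill1Loop items pref s1 s2 skills (PySem.List.pyRange k (items.length : Int) 1) =
      if l.any (pvHasPref pref) then skills ++ [s1, s2] else skills := by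
  intro l
  induction l with
  | nil =>
    intro k hk hd
    have hlen : items.length ≤ k.toNat := by
      by_contra h
      have := List.drop_eq_nil_iff.mp hd
      omega
    rw [PySem.List.pyRange_one_eq_nil (by omega)]
    simp [skill1Loop]
  | cons x t ih =>
    intro k hk hd
    have hlt : k.toNat < items.length := by
      by_contra h
      rw [List.drop_eq_nil_of_le (by omega)] at hd
      simp at hd
    have hklen : k < (items.length : Int) := by omega
    rw [PySem.List.pyRange_one_cons hklen]
    have hget : PySem.List.pyGetD items k "" = items[k.toNat] :=
      PySem.List.pyGetD_eq_getElem items "" (by omega) (by exact_mod_cast hklen)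
    have hx : items[k.toNat] = x := by
      have h0 : (items.drop k.toNat)[0]'(by simp [hd]) = x := by simp [hd]
      rw [List.getElem_drop] at h0
      simpa using h0
    by_cases hp : PySem.List.slice x.toList none (some 6) = pref
    · simp [skill1Loop, hget, hx, hp, pvHasPref, show k ≠ 0 by omega]
    · have hstep : skill1Loop items pref s1 s2 skills
          (k :: PySem.List.pyRange (k + 1) (items.length : Int) 1) =
          skill1Loop items pref s1 s2 skills (PySem.List.pyRange (k + 1) (items.length : Int) 1) := by
        simp [skill1Loop, hget, hx, hp]
      rw [hstep, ih (k + 1) (by omega) (by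
        have hsucc : (k + 1).toNat = k.toNat + 1 := by omega
        rw [hsucc, ← List.drop_drop, hd]
        simp)]
      simp [pvHasPref, hp]

theorem skill1Loop_spec (items : List String) (pref : List Char) (s1 s2 : String)
    (skills : List String) :
    skill1Loop items pref s1 s2 skills (PySem.List.pyRange 0 (items.length : Int) 1) =
      if (items.drop 1).any (pvHasPref pref) then skills ++ [s1, s2] else skills := by
  cases items with
  | nil => simp [PySem.List.pyRange_one_eq_nil, skill1Loop]
  | cons y ys =>
    have h0 : (0 : Int) < ((y :: ys).length : Int) := by simp
    rw [PySem.List.pyRange_one_cons h0]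
    have h01 : (0 : Int) + 1 = 1 := by norm_num
    simp only [skill1Loop, ne_eq, not_true_eq_false, false_and, if_false, h01]
    exact skill1Loop_drop (y :: ys) pref s1 s2 skills ((y :: ys).drop 1) 1 le_rfl rfl

theorem foldl_bools (l : List String) : ∀ (a b : Bool),
    l.foldl (fun (ws : Bool × Bool) it =>
      let p := PySem.List.slice it.toList (some 0) (some 6)
      (ws.1 || decide (p = "weapon".toList), ws.2 || decide (p = "shield".toList))) (a, b) =
      (a || l.any (pvHasPref "weapon".toList), b || l.any (pvHasPref "shield".toList)) := by
  induction l with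
  | nil => intro a b; simp
  | cons x t ih =>
    intro a b
    simp only [List.foldl_cons, List.any_cons, ih, pvHasPref, Bool.or_assoc]

-- ===== VERDICT (by name: the statement is the Claim_ definition above) =====
theorem skill1_spec : Claim_equal_skill1 := by
  intro items _
  unfold Spec_skill1 skill1 skill1_alt
  rw [skill1Loop_spec, skill1Loop_spec, PySem.List.slice_from_one, foldl_bools,
    ← List.drop_one]
  simp only [Bool.false_or, List.nil_append]
  split_ifs <;> simp_all
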